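-- pv_equiv track=rewrite | github.com/Priya77-GLAU/Question_by_HackerRank | collections_challenges.py | split_cubes
-- ===== SOURCE A (Python) =====
-- def split_cubes(row_of_cubes):
--     side_left = []
--     side_rigft = []
--     if len(row_of_cubes) % 2 == 1:
--         side_left.append(row_of_cubes.pop(0))
--     else:
--         pass
--     while len(row_of_cubes):
--         side_rigft.append(row_of_cubes.pop(0))
--         side_left.append(row_of_cubes.pop(0))
--     return side_left, side_rigft
-- ===== SOURCE B (Python) =====
-- def split_cubes(row_of_cubes):
--     left = []
--     right = []
--     to_left = True
--     while row_of_cubes: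
--         val = row_of_cubes.pop()
--         if to_left:
--             left.append(val)
--         else:
--             right.append(val)
--         to_left = not to_left
--     left.reverse()
--     right.reverse()
--     return left, right
-- ===== Notes on version B (the rewrite author's own statement) =====
-- stated objective: faster
-- what changed: B consumes the list back-to-front with pop() and a single boolean toggle (the last element always goes left), reversing the two accumulators once at the end; this eliminates A's length-parity prelude and its two-pops-per-iteration front loop whose pop(0) shifts the whole list each time.
import Mathlib
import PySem

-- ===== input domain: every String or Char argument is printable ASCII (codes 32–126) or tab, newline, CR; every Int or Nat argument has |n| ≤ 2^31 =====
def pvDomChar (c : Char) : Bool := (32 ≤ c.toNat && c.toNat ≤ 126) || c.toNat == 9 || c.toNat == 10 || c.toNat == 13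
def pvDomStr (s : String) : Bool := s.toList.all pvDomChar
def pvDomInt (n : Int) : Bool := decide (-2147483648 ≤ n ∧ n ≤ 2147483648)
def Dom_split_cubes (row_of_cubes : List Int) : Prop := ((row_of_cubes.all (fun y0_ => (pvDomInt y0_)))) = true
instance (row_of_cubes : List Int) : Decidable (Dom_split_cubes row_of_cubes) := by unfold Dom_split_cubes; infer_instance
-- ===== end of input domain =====

-- B traverses the list back-to-front with one boolean toggle instead of A's parity
-- prelude plus two-pops-per-step front loop; same return value. Both Pythons empty the
-- argument list in place (identical mutation); the equivalence proved is about the return value.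

-- ===== PORT A =====
-- A's while loop: pops two elements from the front per iteration, appending the first to
-- side_rigft and the second to side_left. The one-element case is unreachable in A
-- (after the parity prelude the list length is even); Python would raise there.
def splitA_loop : List Int → List Int → List Int → List Int × List Int
  | [], l, r => (l, r)
  | [x], l, r => (l, r ++ [x])   -- unreachable: length is even after the prelude
  | x :: y :: rest, l, r => splitA_loop rest (l ++ [y]) (r ++ [x])

def split_cubes (row_of_cubes : List Int) : List Int × List Int :=
  if row_of_cubes.length % 2 = 1 then
    match row_of_cubes with
    | [] => ([], [])             -- unreachable: odd length is nonempty
    | h :: t => splitA_loop t [h] []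
  else
    splitA_loop row_of_cubes [] []

-- ===== PORT B =====
-- B's while loop: val = row.pop() (from the end, so we walk row.reverse), a boolean
-- toggle starting true routes val to left or right, then both accumulators are reversed.
def splitB_loop : List Int → Bool → List Int → List Int → List Int × List Int
  | [], _, l, r => (l.reverse, r.reverse)
  | v :: rest, t, l, r =>
      if t then splitB_loop rest (!t) (l ++ [v]) r
      else splitB_loop rest (!t) l (r ++ [v])

def split_cubes_alt (row_of_cubes : List Int) : List Int × List Int :=
  splitB_loop row_of_cubes.reverse true [] []

-- ===== PRECONDITION & SPEC =====
def Spec_split_cubes (row_of_cubes : List Int) (out : List Int × List Int) : Prop := out = split_cubes_alt row_of_cubes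
instance (row_of_cubes : List Int) (out : List Int × List Int) : Decidable (Spec_split_cubes row_of_cubes out) := by unfold Spec_split_cubes; infer_instance

-- ===== CLAIM (what is proved, stated in full; the proofs are below) =====
def Claim_equal_split_cubes : Prop := ∀ (row_of_cubes : List Int), Dom_split_cubes row_of_cubes → Spec_split_cubes row_of_cubes (split_cubes row_of_cubes)

-- ===== LEMMAS AND PROOFS =====

/-- Elements at even indices. -/
def evens : List Int → List Int
  | [] => []
  | [x] => [x]
  | x :: _ :: rest => x :: evens rest

/-- Elements at odd indices. -/
def odds : List Int → List Int
  | [] => []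
  | _ :: rest => evens rest

theorem evens_cons (x : Int) (t : List Int) : evens (x :: t) = x :: odds t := by
  cases t <;> simp [evens, odds]

theorem odds_cons (x : Int) (t : List Int) : odds (x :: t) = evens t := rfl

theorem splitA_loop_eq : ∀ l L R : List Int, l.length % 2 = 0 →
    splitA_loop l L R = (L ++ odds l, R ++ evens l) := by
  intro l L R
  induction l, L, R using splitA_loop.induct with
  | case1 L R => intro _; simp [splitA_loop, odds, evens]
  | case2 x L R => intro h; simp at h
  | case3 x y rest L R ih =>
      intro h
      simp only [splitA_loop]
      rw [ih (by simp at h ⊢; omega)]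
      simp [odds_cons, evens_cons, evens]

theorem splitB_loop_eq (m : List Int) : ∀ L R : List Int,
    splitB_loop m true L R = ((L ++ evens m).reverse, (R ++ odds m).reverse) ∧
    splitB_loop m false L R = ((L ++ odds m).reverse, (R ++ evens m).reverse) := by
  induction m with
  | nil => intro L R; simp [splitB_loop, evens, odds]
  | cons x rest ih =>
      intro L R
      constructor
      · rw [show splitB_loop (x :: rest) true L R = splitB_loop rest false (L ++ [x]) R from rfl,
          (ih (L ++ [x]) R).2]
        simp [evens_cons, odds_cons]
      · rw [show splitB_loop (x :: rest) false L R = splitB_loop rest true L (R ++ [x]) from rfl,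
          (ih L (R ++ [x])).1]
        simp [evens_cons, odds_cons]

theorem evens_append_singleton (m : List Int) (x : Int) :
    evens (m ++ [x]) = (if m.length % 2 = 0 then evens m ++ [x] else evens m) ∧
    odds (m ++ [x]) = (if m.length % 2 = 0 then odds m else odds m ++ [x]) := by
  induction m using evens.induct with
  | case1 => simp [evens, odds]
  | case2 y => simp [evens, odds]
  | case3 y z rest ih =>
      have hpar : (y :: z :: rest).length % 2 = rest.length % 2 := by
        simp [List.length_cons]; omega
      constructor
      · show evens (y :: z :: (rest ++ [x])) = _
        rw [show evens (y :: z :: (rest ++ [x])) = y :: evens (rest ++ [x]) from rfl, ih.1]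
        simp only [hpar]
        split_ifs <;> simp [evens]
      · show odds (y :: z :: (rest ++ [x])) = _
        rw [odds_cons, evens_cons, ih.2]
        simp only [hpar]
        split_ifs <;> simp [odds_cons, evens_cons]

theorem evens_reverse (l : List Int) :
    (evens l.reverse).reverse = (if l.length % 2 = 1 then evens l else odds l) ∧
    (odds l.reverse).reverse = (if l.length % 2 = 1 then odds l else evens l) := by
  induction l with
  | nil => simp [evens, odds]
  | cons x t ih =>
      obtain ⟨ih1, ih2⟩ := ih
      simp only [List.reverse_cons]
      rw [(evens_append_singleton t.reverse x).1, (evens_append_singleton t.reverse x).2]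
      simp only [List.length_reverse, List.length_cons]
      by_cases h : t.length % 2 = 0
      · have h2 : (t.length + 1) % 2 = 1 := by omega
        simp [h, h2, ih1, ih2, List.reverse_append, evens_cons, odds_cons]
      · have h1 : t.length % 2 = 1 := by omega
        have h2 : (t.length + 1) % 2 = 0 := by omega
        simp [h1, h2, ih1, ih2, List.reverse_append, evens_cons, odds_cons]

theorem split_cubes_alt_eq (l : List Int) :
    split_cubes_alt l = (if l.length % 2 = 1 then (evens l, odds l) else (odds l, evens l)) := by
  unfold split_cubes_alt
  rw [(splitB_loop_eq l.reverse [] []).1]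
  simp only [List.nil_append]
  rw [(evens_reverse l).1, (evens_reverse l).2]
  split_ifs <;> rfl

theorem split_cubes_eq (l : List Int) :
    split_cubes l = (if l.length % 2 = 1 then (evens l, odds l) else (odds l, evens l)) := by
  cases l with
  | nil => simp [split_cubes, splitA_loop, evens, odds]
  | cons x t =>
      unfold split_cubes
      by_cases h : (x :: t).length % 2 = 1
      · rw [if_pos h, if_pos h]
        show splitA_loop t [x] [] = _
        rw [splitA_loop_eq t [x] [] (by simp at h ⊢; omega)]
        simp [evens_cons, odds_cons]
      · rw [if_neg h, if_neg h, splitA_loop_eq (x :: t) [] [] (by omega)]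
        simp

-- ===== VERDICT (by name: the statement is the Claim_ definition above) =====
theorem split_cubes_spec : Claim_equal_split_cubes := by
  intro l _
  unfold Spec_split_cubes
  rw [split_cubes_eq, split_cubes_alt_eq]
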